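-- pv_equiv track=rewrite | github.com/michalkalis/quiz-agent | scripts/update_corrected_questions.py | find_chroma_id
-- ===== SOURCE A (Python) =====
-- def find_chroma_id(question_text, chroma_docs, chroma_ids):
--     """Find ChromaDB ID by matching a unique substring of the question."""
--     # Try exact match first
--     for i, doc in enumerate(chroma_docs):
--         if doc and doc.strip() == question_text.strip():
--             return chroma_ids[i], i
--
--     # Try substring match on first 60 chars
--     prefix = question_text[:60]
--     matches = [(chroma_ids[i], i) for i, doc in enumerate(chroma_docs) if doc and prefix in doc]
--     if len(matches) == 1:
--         return matches[0]
--
--     # Try longer substring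
--     prefix = question_text[:100]
--     matches = [(chroma_ids[i], i) for i, doc in enumerate(chroma_docs) if doc and prefix in doc]
--     if len(matches) == 1:
--         return matches[0]
--
--     return None, None
-- ===== SOURCE B (Python) =====
-- def find_chroma_id(question_text, chroma_docs, chroma_ids):
--     """Single pass: record the first exact-match index and the index lists of
--     both prefix matches; index chroma_ids only for the finally chosen index."""
--     target = question_text.strip()
--     p60 = question_text[:60]
--     p100 = question_text[:100]
--     exact_idx = None
--     m60 = []
--     m100 = []
--     for i, doc in enumerate(chroma_docs):
--         if not doc:
--             continue
--         if exact_idx is None and doc.strip() == target: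
--             exact_idx = i
--         if p60 in doc:
--             m60.append(i)
--         if p100 in doc:
--             m100.append(i)
--     if exact_idx is not None:
--         return chroma_ids[exact_idx], exact_idx
--     if len(m60) == 1:
--         return chroma_ids[m60[0]], m60[0]
--     if len(m100) == 1:
--         return chroma_ids[m100[0]], m100[0]
--     return None, None
-- ===== Notes on version B (the rewrite author's own statement) =====
-- stated objective: faster
-- what changed: A makes up to three separate scans over chroma_docs (an early-return exact-match loop plus two list comprehensions, each re-slicing the prefix and eagerly indexing chroma_ids); B makes one single pass that records the first exact-match index and both prefix-match index lists with the prefixes computed once, then decides afterwards and indexes chroma_ids only for the chosen index.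
import Mathlib
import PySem

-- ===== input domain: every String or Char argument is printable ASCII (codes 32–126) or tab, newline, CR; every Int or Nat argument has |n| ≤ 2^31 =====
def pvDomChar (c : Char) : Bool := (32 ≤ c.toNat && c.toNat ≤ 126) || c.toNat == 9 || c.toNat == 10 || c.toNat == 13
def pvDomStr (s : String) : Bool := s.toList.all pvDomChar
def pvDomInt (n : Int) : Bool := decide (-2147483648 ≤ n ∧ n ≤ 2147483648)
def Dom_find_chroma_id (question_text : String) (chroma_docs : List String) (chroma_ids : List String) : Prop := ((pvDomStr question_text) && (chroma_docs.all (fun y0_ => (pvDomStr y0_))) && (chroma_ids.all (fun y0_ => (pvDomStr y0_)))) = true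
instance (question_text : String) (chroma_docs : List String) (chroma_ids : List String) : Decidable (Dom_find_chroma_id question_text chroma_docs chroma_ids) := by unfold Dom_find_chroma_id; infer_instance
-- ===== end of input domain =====

-- B replaces A's up-to-three scans over chroma_docs by one single pass collecting the first
-- exact-match index and both prefix-match index lists (one pass, prefixes sliced once; a constant-factor change).


-- ===== PORT A =====
-- the 'for i, doc in enumerate(chroma_docs): if doc and doc.strip() == question_text.strip(): return …' loop;
-- 'chroma_ids[i]' is ported as List.getD (exact for the in-range indices Pre_ admits; Python raises IndexError outside Pre_)
def pvExactScan (question_text : String) (chroma_ids : List String) :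
    List String → Nat → Option (Option String × Option Int)
  | [], _ => none
  | doc :: rest, i =>
    if doc ≠ "" ∧ PySem.Str.strip doc = PySem.Str.strip question_text then
      some (some (chroma_ids.getD i ""), some (i : Int))
    else pvExactScan question_text chroma_ids rest (i + 1)

-- the comprehension '[(chroma_ids[i], i) for i, doc in enumerate(chroma_docs) if doc and prefix in doc]'
def pvMatchScan (pref : String) (chroma_ids : List String) :
    List String → Nat → List (Option String × Option Int)
  | [], _ => []
  | doc :: rest, i =>
    if doc ≠ "" ∧ PySem.Str.isIn pref doc then
      (some (chroma_ids.getD i ""), some (i : Int)) :: pvMatchScan pref chroma_ids rest (i + 1)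
    else pvMatchScan pref chroma_ids rest (i + 1)

def find_chroma_id (question_text : String) (chroma_docs : List String) (chroma_ids : List String) : Option String × Option Int :=
  match pvExactScan question_text chroma_ids chroma_docs 0 with
  | some r => r
  | none =>
    let pref60 := PySem.Str.slice question_text none (some 60)
    let matches60 := pvMatchScan pref60 chroma_ids chroma_docs 0
    if matches60.length = 1 then matches60.headD (none, none)
    else
      let pref100 := PySem.Str.slice question_text none (some 100)
      let matches100 := pvMatchScan pref100 chroma_ids chroma_docs 0
      if matches100.length = 1 then matches100.headD (none, none)
      else (none, none)

-- ===== PORT B =====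
-- B's single 'for i, doc in enumerate(chroma_docs)' loop: state = (first exact index, 60-match indices, 100-match indices);
-- chroma_ids is indexed only for the finally chosen index, after the loop
def pvLoopB (target p60 p100 : String) :
    List String → Nat → Option Nat × List Nat × List Nat → Option Nat × List Nat × List Nat
  | [], _, st => st
  | doc :: rest, i, st =>
    if doc = "" then pvLoopB target p60 p100 rest (i + 1) st
    else
      let e := match st.1 with
        | some j => some j
        | none => if PySem.Str.strip doc = target then some i else none
      let m60 := if PySem.Str.isIn p60 doc then st.2.1 ++ [i] else st.2.1
      let m100 := if PySem.Str.isIn p100 doc then st.2.2 ++ [i] else st.2.2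
      pvLoopB target p60 p100 rest (i + 1) (e, m60, m100)

def find_chroma_id_alt (question_text : String) (chroma_docs : List String) (chroma_ids : List String) : Option String × Option Int :=
  let target := PySem.Str.strip question_text
  let p60 := PySem.Str.slice question_text none (some 60)
  let p100 := PySem.Str.slice question_text none (some 100)
  let st := pvLoopB target p60 p100 chroma_docs 0 (none, [], [])
  match st.1 with
  | some j => (some (chroma_ids.getD j ""), some (j : Int))
  | none =>
    if st.2.1.length = 1 then
      let j := st.2.1.headD 0
      (some (chroma_ids.getD j ""), some (j : Int))
    else if st.2.2.length = 1 then
      let j := st.2.2.headD 0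
      (some (chroma_ids.getD j ""), some (j : Int))
    else (none, none)

-- ===== PRECONDITION & SPEC =====
-- Pre_ excludes exactly the inputs on which the Python A raises IndexError on 'chroma_ids[i]':
-- either the first exact-stripped-match index is out of range of chroma_ids, or there is no exact
-- match and some non-empty doc containing the 60-char prefix sits at an out-of-range index
-- (the 100-char comprehension only indexes docs that also contain the 60-char prefix).
def Pre_find_chroma_id (question_text : String) (chroma_docs : List String) (chroma_ids : List String) : Prop :=
  (∃ i, i < chroma_docs.length ∧
      (chroma_docs.getD i "" ≠ "" ∧ PySem.Str.strip (chroma_docs.getD i "") = PySem.Str.strip question_text) ∧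
      (∀ j, j < i → ¬ (chroma_docs.getD j "" ≠ "" ∧ PySem.Str.strip (chroma_docs.getD j "") = PySem.Str.strip question_text)) ∧
      i < chroma_ids.length)
  ∨ ((∀ i, i < chroma_docs.length → ¬ (chroma_docs.getD i "" ≠ "" ∧ PySem.Str.strip (chroma_docs.getD i "") = PySem.Str.strip question_text)) ∧
     (∀ i, i < chroma_docs.length →
        (chroma_docs.getD i "" ≠ "" ∧ PySem.Str.isIn (PySem.Str.slice question_text none (some 60)) (chroma_docs.getD i "") = true) →
        i < chroma_ids.length))
instance (question_text : String) (chroma_docs : List String) (chroma_ids : List String) : Decidable (Pre_find_chroma_id question_text chroma_docs chroma_ids) := by unfold Pre_find_chroma_id; infer_instance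

def pvWitness_find_chroma_id : String × List String × List String := ("abc", ["xy", "abc"], ["id0", "id1"])

def Spec_find_chroma_id (question_text : String) (chroma_docs : List String) (chroma_ids : List String) (out : Option String × Option Int) : Prop := out = find_chroma_id_alt question_text chroma_docs chroma_ids
instance (question_text : String) (chroma_docs : List String) (chroma_ids : List String) (out : Option String × Option Int) : Decidable (Spec_find_chroma_id question_text chroma_docs chroma_ids out) := by unfold Spec_find_chroma_id; infer_instance

-- ===== CLAIM (what is proved, stated in full; the proofs are below) =====
def Claim_equal_find_chroma_id : Prop := ∀ (question_text : String) (chroma_docs : List String) (chroma_ids : List String), Dom_find_chroma_id question_text chroma_docs chroma_ids → Pre_find_chroma_id question_text chroma_docs chroma_ids → Spec_find_chroma_id question_text chroma_docs chroma_ids (find_chroma_id question_text chroma_docs chroma_ids)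

-- ===== LEMMAS AND PROOFS =====

-- the first index (from i on) whose doc is nonempty and strips to the target
def pvFirstExact (target : String) : List String → Nat → Option Nat
  | [], _ => none
  | doc :: rest, i =>
    if doc ≠ "" ∧ PySem.Str.strip doc = target then some i
    else pvFirstExact target rest (i + 1)

-- the indices of the non-empty docs (from i on) containing pref
def pvMatchIdx (pref : String) : List String → Nat → List Nat
  | [], _ => []
  | doc :: rest, i =>
    if doc ≠ "" ∧ PySem.Str.isIn pref doc then i :: pvMatchIdx pref rest (i + 1)
    else pvMatchIdx pref rest (i + 1)

theorem pvExactScan_eq (question_text : String) (chroma_ids : List String) :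
    ∀ (docs : List String) (i : Nat),
      pvExactScan question_text chroma_ids docs i =
        (pvFirstExact (PySem.Str.strip question_text) docs i).map
          (fun j => (some (chroma_ids.getD j ""), some (j : Int)))
  | [], _ => rfl
  | doc :: rest, i => by
    simp only [pvExactScan, pvFirstExact]
    split_ifs with h
    · rfl
    · exact pvExactScan_eq question_text chroma_ids rest (i + 1)

theorem pvMatchScan_eq (pref : String) (chroma_ids : List String) :
    ∀ (docs : List String) (i : Nat),
      pvMatchScan pref chroma_ids docs i =
        (pvMatchIdx pref docs i).map (fun j => (some (chroma_ids.getD j ""), some (j : Int)))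
  | [], _ => rfl
  | doc :: rest, i => by
    simp only [pvMatchScan, pvMatchIdx]
    split_ifs with h
    · simp [pvMatchScan_eq pref chroma_ids rest (i + 1)]
    · exact pvMatchScan_eq pref chroma_ids rest (i + 1)

theorem pvLoopB_spec (target p60 p100 : String) :
    ∀ (docs : List String) (i : Nat) (e : Option Nat) (m60 m100 : List Nat),
      pvLoopB target p60 p100 docs i (e, m60, m100) =
        ((match e with | some j => some j | none => pvFirstExact target docs i),
         m60 ++ pvMatchIdx p60 docs i,
         m100 ++ pvMatchIdx p100 docs i)
  | [], i, e, m60, m100 => by cases e <;> simp [pvLoopB, pvFirstExact, pvMatchIdx]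
  | doc :: rest, i, e, m60, m100 => by
    simp only [pvLoopB, pvFirstExact, pvMatchIdx]
    by_cases hd : doc = ""
    · have hne : ¬ (doc ≠ "" ∧ PySem.Str.strip doc = target) := by simp [hd]
      have hne60 : ¬ (doc ≠ "" ∧ PySem.Str.isIn p60 doc) := by simp [hd]
      have hne100 : ¬ (doc ≠ "" ∧ PySem.Str.isIn p100 doc) := by simp [hd]
      simp only [if_pos hd, if_neg hne, if_neg hne60, if_neg hne100]
      exact pvLoopB_spec target p60 p100 rest (i + 1) e m60 m100
    · simp only [if_neg hd]
      rw [pvLoopB_spec target p60 p100 rest (i + 1)]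
      cases e with
      | some j =>
        simp only [Prod.mk.injEq]
        refine ⟨trivial, ?_, ?_⟩ <;> · split_ifs <;> simp_all
      | none =>
        by_cases hs : PySem.Str.strip doc = target <;>
          · simp [hd, hs]
            refine ⟨?_, ?_⟩ <;> · split_ifs <;> simp_all

-- ===== VERDICT (by name: the statement is the Claim_ definition above) =====
theorem find_chroma_id_spec : Claim_equal_find_chroma_id := by
  intro question_text chroma_docs chroma_ids _ _
  unfold Spec_find_chroma_id find_chroma_id find_chroma_id_alt
  dsimp only
  rw [pvExactScan_eq, pvLoopB_spec, pvMatchScan_eq, pvMatchScan_eq]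
  dsimp only
  cases h : pvFirstExact (PySem.Str.strip question_text) chroma_docs 0 with
  | some j => simp
  | none =>
    simp only [Option.map_none, List.nil_append, List.length_map]
    by_cases h60 : (pvMatchIdx (PySem.Str.slice question_text none (some 60)) chroma_docs 0).length = 1
    · obtain ⟨j, hl⟩ := List.length_eq_one_iff.mp h60
      simp [hl]
    · by_cases h100 : (pvMatchIdx (PySem.Str.slice question_text none (some 100)) chroma_docs 0).length = 1
      · obtain ⟨j, hl⟩ := List.length_eq_one_iff.mp h100
        simp [h60, hl]
      · simp [h60, h100]
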